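-- pv_equiv track=rewrite | github.com/NerdPractitioner/Portland-State-University-Projects | exercise 5.py | create_border_image
-- ===== SOURCE A (Python) =====
-- def create_zeroed_image(n):
--     """create_zeroed_image takes an integer `n` and returns an n-by-n
--     list of lists containing all zeros
--
-- Output of print_image(create_zeroed_image(5))
-- 00000
-- 00000
-- 00000
-- 00000
-- 00000
--
-- >>> create_zeroed_image(5)
-- [[0, 0, 0, 0, 0], [0, 0, 0, 0, 0], [0, 0, 0, 0, 0], [0, 0, 0, 0, 0], [0, 0, 0, 0, 0]]
-- >>> create_zeroed_image(0)
-- []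
-- >>> create_zeroed_image(1)
-- [[0]]
-- >>> create_zeroed_image(2)
-- [[0, 0], [0, 0]]
-- >>> create_zeroed_image(4)
-- [[0, 0, 0, 0], [0, 0, 0, 0], [0, 0, 0, 0], [0, 0, 0, 0]]
--     """
--
--     alist = []
--     for i in range(0, n):
--         alist.append([])
--         for j in range(0,n):
--             alist[i].append(0)
--     return alist
--
-- def create_border_image(n):
--     """create_border_image takes an integer `n` and returns an n-by-n
--     list of lists containing all zeros execpt for the border
--     of the image
--
-- Output of print_image(create_border_image(5)):
-- 11111
-- 10001
-- 10001
-- 10001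
-- 11111
--
-- >>> create_border_image(5)
-- [[1, 1, 1, 1, 1], [1, 0, 0, 0, 1], [1, 0, 0, 0, 1], [1, 0, 0, 0, 1], [1, 1, 1, 1, 1]]
-- >>> create_border_image(5)
-- [[1, 1, 1, 1, 1], [1, 0, 0, 0, 1], [1, 0, 0, 0, 1], [1, 0, 0, 0, 1], [1, 1, 1, 1, 1]]
-- >>> create_border_image(2)
-- [[1, 1], [1, 1]]
-- >>> create_border_image(1)
-- [[1]]
-- >>> create_border_image(4)
-- [[1, 1, 1, 1], [1, 0, 0, 1], [1, 0, 0, 1], [1, 1, 1, 1]]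
--     """
--     img=create_zeroed_image(n)
--     for i in range(n):
--         for j in range(n):
--             img[i][0]=1
--             img[0][j]=1
--             img[i][n-1]=1
--             img[n-1][j]=1
--     return img
-- ===== SOURCE B (Python) =====
-- def create_border_image(n):
--     result = []
--     for i in range(n):
--         row = []
--         for j in range(n):
--             row.append(1 if i == 0 or i == n - 1 or j == 0 or j == n - 1 else 0)
--         result.append(row)
--     return result
-- ===== Notes on version B (the rewrite author's own statement) =====
-- stated objective: simpler
-- what changed: B computes each cell directly in one pass with a border predicate instead of A's two phases (build an all-zeros grid, then overwrite border cells inside a redundant n*n double loop of four assignments each).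
import Mathlib
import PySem

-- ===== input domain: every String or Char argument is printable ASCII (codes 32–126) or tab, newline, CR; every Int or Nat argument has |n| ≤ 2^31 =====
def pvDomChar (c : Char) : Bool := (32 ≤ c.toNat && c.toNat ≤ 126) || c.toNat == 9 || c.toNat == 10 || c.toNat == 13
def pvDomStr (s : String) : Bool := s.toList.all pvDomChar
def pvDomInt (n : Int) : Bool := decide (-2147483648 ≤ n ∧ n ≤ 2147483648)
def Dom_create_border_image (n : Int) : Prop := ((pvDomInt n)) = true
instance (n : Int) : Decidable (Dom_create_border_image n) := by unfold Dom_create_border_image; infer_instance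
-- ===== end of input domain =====

-- B computes each cell directly with a border predicate in one pass, instead of A's
-- two phases (all-zeros grid, then overwrite border cells in a redundant double loop).


-- ===== PORT A =====
-- helper from the same module: n-by-n grid of zeros, built by appending
def create_zeroed_image (n : Int) : List (List Int) :=
  (PySem.List.pyRange 0 n 1).foldl (fun alist i =>
    -- alist.append([]); then the inner loop appends 0 to alist[i] n times
    (PySem.List.pyRange 0 n 1).foldl
      (fun al _j => al.modify i.toNat (fun row => row ++ [0]))
      (alist ++ [[]]))
    []
-- img[i][j] = v; every index A produces comes from range(n) (hence nonnegative) or is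
-- n-1 with n ≥ 1, so .toNat is exact here (no negative index ever reaches this)
def pySet2 (img : List (List Int)) (i j v : Int) : List (List Int) :=
  img.modify i.toNat (fun row => row.set j.toNat v)

def create_border_image (n : Int) : List (List Int) :=
  let img := create_zeroed_image n
  (PySem.List.pyRange 0 n 1).foldl (fun img i =>
    (PySem.List.pyRange 0 n 1).foldl (fun img j =>
      pySet2 (pySet2 (pySet2 (pySet2 img i 0 1) 0 j 1) i (n-1) 1) (n-1) j 1)
      img)
    img

-- ===== PORT B =====
def create_border_image_alt (n : Int) : List (List Int) :=
  (PySem.List.pyRange 0 n 1).map (fun i =>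
    (PySem.List.pyRange 0 n 1).map (fun j =>
      if i = 0 ∨ i = n - 1 ∨ j = 0 ∨ j = n - 1 then (1 : Int) else 0))

-- ===== PRECONDITION & SPEC =====
def Spec_create_border_image (n : Int) (out : List (List Int)) : Prop := out = create_border_image_alt n
instance (n : Int) (out : List (List Int)) : Decidable (Spec_create_border_image n out) := by unfold Spec_create_border_image; infer_instance

-- ===== CLAIM (what is proved, stated in full; the proofs are below) =====
def Claim_equal_create_border_image : Prop := ∀ (n : Int), Dom_create_border_image n → Spec_create_border_image n (create_border_image n)

-- ===== LEMMAS AND PROOFS =====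

-- an m×m grid tabulated from a cell function
def pvGrid (m : Nat) (f : Nat → Nat → Int) : List (List Int) :=
  (List.range m).map (fun p => (List.range m).map (f p))

theorem pvGrid_congr {m : Nat} {f g : Nat → Nat → Int}
    (h : ∀ p q, p < m → q < m → f p q = g p q) : pvGrid m f = pvGrid m g := by
  unfold pvGrid
  refine List.map_congr_left fun p hp => List.map_congr_left fun q hq =>
    h p q (List.mem_range.mp hp) (List.mem_range.mp hq)

theorem pyRange_zero_eq (m : Nat) :
    PySem.List.pyRange 0 (m : Int) 1 = (List.range m).map (fun k : Nat => (k : Int)) := by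
  rw [PySem.List.pyRange_one, Int.sub_zero, Int.toNat_natCast]
  refine List.map_congr_left fun k _ => ?_
  exact zero_add _

-- a single write of 1 into a tabulated grid re-tabulates with one cell updated
theorem set_pvGrid (m : Nat) (f : Nat → Nat → Int) (i j : Int) :
    pySet2 (pvGrid m f) i j 1
      = pvGrid m (fun p q => if p = i.toNat ∧ q = j.toNat then 1 else f p q) := by
  unfold pySet2 pvGrid
  apply List.ext_getElem
  · simp
  intro p h1 h2
  simp only [List.getElem_modify, List.getElem_map, List.getElem_range] at *
  by_cases hpi : i.toNat = p
  · subst hpi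
    apply List.ext_getElem
    · simp
    intro q hq1 hq2
    simp only [List.getElem_map, List.getElem_range] at *
    by_cases hqj : j.toNat = q
    · subst hqj; simp
    · simp [hqj, Ne.symm hqj]
  · simp only [if_neg hpi]
    refine List.map_congr_left fun q _ => ?_
    have : ¬ (p = i.toNat ∧ q = j.toNat) := fun ⟨h, _⟩ => hpi h.symm
    simp [this]

-- a fold of single-cell writes of 1 paints exactly the cells listed (order irrelevant)
theorem fold_sets (m : Nat) (C : List (Int × Int)) :
    ∀ f : Nat → Nat → Int,
    C.foldl (fun img pq => pySet2 img pq.1 pq.2 1) (pvGrid m f)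
      = pvGrid m (fun p q =>
          if (p, q) ∈ C.map (fun pq => (pq.1.toNat, pq.2.toNat)) then 1 else f p q) := by
  induction C with
  | nil => intro f; simp
  | cons hd tl ih =>
    intro f
    simp only [List.foldl_cons, set_pvGrid m f hd.1 hd.2, ih]
    apply pvGrid_congr
    intro p q _ _
    simp only [List.map_cons, List.mem_cons, Prod.mk.injEq]
    split_ifs <;> tauto

theorem foldl_const_append (l : List Int) (k : Nat) (a : List (List Int)) :
    l.foldl (fun al _ => al.modify k (fun row => row ++ [(0 : Int)])) a
      = a.modify k (fun row => row ++ List.replicate l.length 0) := by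
  induction l generalizing a with
  | nil =>
    simp only [List.foldl_nil, List.length_nil, List.replicate_zero, List.append_nil]
    exact (List.modify_id k a).symm
  | cons hd tl ih =>
    simp only [List.foldl_cons, ih, List.length_cons]
    apply List.ext_getElem
    · simp
    intro p h1 h2
    simp only [List.getElem_modify]
    split_ifs
    · simp [List.replicate_succ]
    · rfl

theorem zeroed_eq (m : Nat) :
    create_zeroed_image (m : Int) = pvGrid m (fun _ _ => 0) := by
  unfold create_zeroed_image
  rw [pyRange_zero_eq]
  have key : ∀ t : Nat,
      ((List.range t).map (fun k : Nat => (k : Int))).foldl (fun alist i =>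
        ((List.range m).map (fun k : Nat => (k : Int))).foldl
          (fun al _j => al.modify i.toNat (fun row => row ++ [0]))
          (alist ++ [[]])) []
      = List.replicate t (List.replicate m (0 : Int)) := by
    intro t
    induction t with
    | zero => simp
    | succ t ih =>
      rw [List.range_succ, List.map_append, List.foldl_append, ih]
      simp only [List.map_cons, List.map_nil, List.foldl_cons, List.foldl_nil]
      rw [foldl_const_append]
      have htoNat : ((t : Int)).toNat = t := by simp
      rw [htoNat, List.length_map, List.length_range]
      apply List.ext_getElem
      · simp
      intro p h1 h2
      simp only [List.getElem_modify, List.replicate_succ']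
      rcases Nat.lt_trichotomy p t with h | h | h
      · rw [if_neg (by omega),
            List.getElem_append_left (by simpa using h),
            List.getElem_append_left (by simpa using h)]
      · subst h
        rw [if_pos rfl,
            List.getElem_append_right (by simp),
            List.getElem_append_right (by simp)]
        simp
      · exfalso; simp at h2; omega
  rw [key m]
  unfold pvGrid
  apply List.ext_getElem
  · simp
  intro p h1 h2
  simp

-- the list of cells A's double loop writes 1 into, flattened
def pvCoords (m : Nat) (n : Int) : List (Int × Int) :=
  ((List.range m).map (fun k : Nat => (k : Int))).flatMap (fun i =>
    ((List.range m).map (fun k : Nat => (k : Int))).flatMap (fun j =>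
      [(i, 0), (0, j), (i, n - 1), (n - 1, j)]))

theorem mem_coords (m : Nat) (hm : 1 ≤ m) (p q : Nat) (hp : p < m) (hq : q < m) :
    ((p, q) ∈ (pvCoords m (m : Int)).map (fun pq => (pq.1.toNat, pq.2.toNat)))
      ↔ (p = 0 ∨ p = m - 1 ∨ q = 0 ∨ q = m - 1) := by
  unfold pvCoords
  simp only [List.mem_map, List.mem_flatMap, List.mem_range, List.mem_cons,
    List.not_mem_nil, or_false, Prod.mk.injEq]
  constructor
  · rintro ⟨pq, ⟨i, ⟨a, ha, rfl⟩, j, ⟨b, hb, rfl⟩, hmem⟩, heq⟩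
    rcases hmem with rfl | rfl | rfl | rfl <;> obtain ⟨h1, h2⟩ := heq <;>
      simp only at h1 h2 <;> omega
  · intro h
    rcases h with h | h | h | h
    · exact ⟨((0 : Int), (q : Int)),
        ⟨(0 : Int), ⟨0, by omega, by simp⟩, (q : Int), ⟨q, hq, rfl⟩,
          Or.inr (Or.inl rfl)⟩, by simp; omega⟩
    · exact ⟨(((m : Int) - 1), (q : Int)),
        ⟨(0 : Int), ⟨0, by omega, by simp⟩, (q : Int), ⟨q, hq, rfl⟩,
          Or.inr (Or.inr (Or.inr rfl))⟩, by simp; omega⟩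
    · exact ⟨((p : Int), (0 : Int)),
        ⟨(p : Int), ⟨p, hp, rfl⟩, (0 : Int), ⟨0, by omega, by simp⟩,
          Or.inl rfl⟩, by simp; omega⟩
    · exact ⟨((p : Int), ((m : Int) - 1)),
        ⟨(p : Int), ⟨p, hp, rfl⟩, (0 : Int), ⟨0, by omega, by simp⟩,
          Or.inr (Or.inr (Or.inl rfl))⟩, by simp; omega⟩

theorem border_eq (m : Nat) :
    create_border_image (m : Int) = pvGrid m (fun p q =>
      if (p, q) ∈ (pvCoords m (m : Int)).map (fun pq => (pq.1.toNat, pq.2.toNat))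
      then 1 else 0) := by
  unfold create_border_image
  rw [zeroed_eq, pyRange_zero_eq]
  have hflat :
      ((List.range m).map (fun k : Nat => (k : Int))).foldl (fun img i =>
        ((List.range m).map (fun k : Nat => (k : Int))).foldl (fun img j =>
          pySet2 (pySet2 (pySet2 (pySet2 img i 0 1) 0 j 1) i ((m:Int)-1) 1) ((m:Int)-1) j 1)
          img) (pvGrid m (fun _ _ => 0))
      = (pvCoords m (m : Int)).foldl (fun img pq => pySet2 img pq.1 pq.2 1)
          (pvGrid m (fun _ _ => 0)) := by
    unfold pvCoords
    simp only [List.foldl_flatMap, List.foldl_cons, List.foldl_nil]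
  simp only [hflat, fold_sets]

theorem alt_eq (m : Nat) :
    create_border_image_alt (m : Int) = pvGrid m (fun p q =>
      if p = 0 ∨ p = m - 1 ∨ q = 0 ∨ q = m - 1 then 1 else 0) := by
  unfold create_border_image_alt pvGrid
  rw [pyRange_zero_eq, List.map_map]
  refine List.map_congr_left fun p hp => ?_
  simp only [List.map_map]
  refine List.map_congr_left fun q hq => ?_
  simp only [List.mem_range] at hp hq
  have hiff : ((p : Int) = 0 ∨ (p : Int) = (m : Int) - 1 ∨ (q : Int) = 0 ∨ (q : Int) = (m : Int) - 1)
      ↔ (p = 0 ∨ p = m - 1 ∨ q = 0 ∨ q = m - 1) := by omega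
  exact if_congr hiff rfl rfl

theorem empty_case (n : Int) (hn : n ≤ 0) :
    create_border_image n = create_border_image_alt n := by
  have hr : PySem.List.pyRange 0 n 1 = [] := by
    have h0 : (n - 0).toNat = 0 := by omega
    rw [PySem.List.pyRange_one, h0]
    rfl
  unfold create_border_image create_border_image_alt create_zeroed_image
  simp [hr]

-- ===== VERDICT (by name: the statement is the Claim_ definition above) =====
theorem create_border_image_spec : Claim_equal_create_border_image := by
  intro n _
  unfold Spec_create_border_image
  rcases (by omega : n ≤ 0 ∨ 0 < n) with hn | hn
  · exact empty_case n hn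
  · have hm : 1 ≤ n.toNat := by omega
    have hcast : n = (n.toNat : Int) := by omega
    rw [hcast, border_eq, alt_eq]
    apply pvGrid_congr
    intro p q hp hq
    exact if_congr (mem_coords n.toNat hm p q hp hq) rfl rfl
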